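-- pv_equiv track=rewrite | github.com/SubhamAgarwal1/NeuraDynamicsAIAssignment | src/ai_pipeline/graph.py | _normalise_tokens
-- ===== SOURCE A (Python) =====
-- from typing import Dict, List, Literal, Optional, Tuple, TypedDict
--
-- def _normalise_tokens(tokens: List[str]) -> List[str]:
--     discard_words = {
--         "what",
--         "whats",
--         "is",
--         "the",
--         "weather",
--         "forecast",
--         "tell",
--         "me",
--         "about",
--         "his",
--         "her",
--         "their",
--         "location",
--         "current",
--     }
--     stop_words = {"now", "right", "currently", "today", "outside", "please", "thanks", "thank"}
--     cleaned: List[str] = []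
--     for token in tokens:
--         if token in stop_words:
--             break
--         if token in discard_words:
--             continue
--         cleaned.append(token)
--     return cleaned
-- ===== SOURCE B (Python) =====
-- from typing import List
--
-- def _normalise_tokens(tokens: List[str]) -> List[str]:
--     discard_words = {
--         "what", "whats", "is", "the", "weather", "forecast", "tell", "me",
--         "about", "his", "her", "their", "location", "current",
--     }
--     stop_words = {"now", "right", "currently", "today", "outside", "please", "thanks", "thank"}
--     # Phase 1: locate the cut point as the minimum index of any stop-word
--     # occurrence (scans the whole list; no break/early exit).
--     cut = min((i for i, t in enumerate(tokens) if t in stop_words), default=len(tokens))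
--     # Phase 2: filter discard words out of the sliced prefix.
--     return [t for t in tokens[:cut] if t not in discard_words]
-- ===== Notes on version B (the rewrite author's own statement) =====
-- stated objective: alternative
-- what changed: A's fused loop with break/continue is replaced by an index-based two-phase algorithm: compute the cut point as the minimum index of any stop-word occurrence over the whole list (no early exit), slice the prefix, then filter discard words in a separate pass.
import Mathlib
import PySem

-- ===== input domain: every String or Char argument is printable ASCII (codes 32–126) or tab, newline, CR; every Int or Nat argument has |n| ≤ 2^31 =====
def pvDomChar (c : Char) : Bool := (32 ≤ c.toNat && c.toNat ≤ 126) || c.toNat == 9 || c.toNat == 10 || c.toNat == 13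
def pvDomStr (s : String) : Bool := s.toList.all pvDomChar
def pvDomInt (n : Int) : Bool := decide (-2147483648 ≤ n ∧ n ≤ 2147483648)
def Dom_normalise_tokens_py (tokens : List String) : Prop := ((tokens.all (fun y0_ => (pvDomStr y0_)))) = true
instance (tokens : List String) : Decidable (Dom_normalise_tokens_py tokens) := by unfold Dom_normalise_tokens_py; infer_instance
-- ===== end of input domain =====

-- B replaces A's fused break/continue loop by an index-based two-phase algorithm:
-- cut = minimum index of any stop-word occurrence (whole-list scan, no early exit),
-- then slice the prefix and filter discard words in a separate pass (same cost).

-- ===== PORT A =====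
def pvDiscardA : PySem.Set String :=
  PySem.Set.ofList ["what", "whats", "is", "the", "weather", "forecast", "tell", "me",
    "about", "his", "her", "their", "location", "current"]
def pvStopA : PySem.Set String :=
  PySem.Set.ofList ["now", "right", "currently", "today", "outside", "please", "thanks", "thank"]
-- A's loop: break on stop word, continue on discard word, else append to cleaned
def pvLoopA : List String → List String → List String
  | cleaned, [] => cleaned
  | cleaned, token :: rest =>
    if pvStopA.contains token then cleaned
    else if pvDiscardA.contains token then pvLoopA cleaned rest
    else pvLoopA (cleaned ++ [token]) rest

def normalise_tokens_py (tokens : List String) : List String := pvLoopA [] tokens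

-- ===== PORT B =====
def pvDiscardB : PySem.Set String :=
  PySem.Set.ofList ["what", "whats", "is", "the", "weather", "forecast", "tell", "me",
    "about", "his", "her", "their", "location", "current"]
def pvStopB : PySem.Set String :=
  PySem.Set.ofList ["now", "right", "currently", "today", "outside", "please", "thanks", "thank"]

-- phase 1: cut = min of stop-word indices (default len); phase 2: slice + filter
def normalise_tokens_py_alt (tokens : List String) : List String :=
  let cut : Int :=
    (PySem.List.min?
      (((PySem.List.enumerate tokens).filter (fun p => pvStopB.contains p.2)).map Prod.fst)
      (fun i => i)).getD (tokens.length : Int)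
  (PySem.List.slice tokens none (some cut)).filter (fun t => !pvDiscardB.contains t)

-- ===== PRECONDITION & SPEC =====
def Spec_normalise_tokens_py (tokens : List String) (out : List String) : Prop := out = normalise_tokens_py_alt tokens
instance (tokens : List String) (out : List String) : Decidable (Spec_normalise_tokens_py tokens out) := by unfold Spec_normalise_tokens_py; infer_instance

-- ===== CLAIM (what is proved, stated in full; the proofs are below) =====
def Claim_equal_normalise_tokens_py : Prop := ∀ (tokens : List String), Dom_normalise_tokens_py tokens → Spec_normalise_tokens_py tokens (normalise_tokens_py tokens)

-- ===== LEMMAS AND PROOFS =====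
-- A's loop equals takeWhile-then-filter (accumulator generalised)
theorem pvLoopA_eq (ts : List String) : ∀ (acc : List String),
    pvLoopA acc ts =
      acc ++ (ts.takeWhile (fun t => !pvStopA.contains t)).filter (fun t => !pvDiscardA.contains t) := by
  induction ts with
  | nil => intro acc; simp [pvLoopA]
  | cons t rest ih =>
    intro acc
    by_cases hs : t ∈ pvStopA
    · simp [pvLoopA, hs, List.takeWhile]
    · by_cases hd : t ∈ pvDiscardA
      · simp [pvLoopA, hs, hd, List.takeWhile, ih]
      · simp [pvLoopA, hs, hd, List.takeWhile, ih]

-- foldl min keeps its seed when the seed is a lower bound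
theorem pvFoldlMin_of_le (L : List Int) : ∀ (x : Int), (∀ y ∈ L, x ≤ y) → L.foldl min x = x := by
  induction L with
  | nil => intro x _; rfl
  | cons a t ih =>
    intro x h
    simp only [List.foldl_cons]
    rw [min_eq_left (h a (by simp))]
    exact ih x (fun y hy => h y (by simp [hy]))

-- every index produced by enumerate ts s is ≥ s
theorem pvEnumerate_fst_ge (ts : List String) (s : Int) :
    ∀ p ∈ PySem.List.enumerate ts s, s ≤ p.1 := by
  intro p hp
  obtain ⟨k, hk, rfl⟩ := (PySem.List.mem_enumerate_iff _ _ _).mp hp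
  simp

-- generalized cut-point lemma over an arbitrary start index
theorem pvCut_gen (ts : List String) : ∀ (s : Int),
    ((PySem.List.min?
        (((PySem.List.enumerate ts s).filter (fun p => pvStopB.contains p.2)).map Prod.fst)
        (fun i => i)).getD (s + ts.length))
      = s + ((ts.takeWhile (fun t => !pvStopB.contains t)).length : Int) := by
  induction ts with
  | nil => intro s; simp [PySem.List.enumerate_nil, PySem.List.min?]
  | cons t rest ih =>
    intro s
    rw [PySem.List.enumerate_cons]
    by_cases hs : t ∈ pvStopB
    · have hmin : PySem.List.min?
          ((((s, t) :: PySem.List.enumerate rest (s + 1)).filter (fun p => pvStopB.contains p.2)).map Prod.fst)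
          (fun i => i) = some s := by
        simp only [List.filter_cons, PySem.Set.contains_eq_listContains,
          List.contains_iff_mem, hs, if_pos, List.map_cons]
        rw [PySem.List.min?_id_cons]
        congr 1
        apply pvFoldlMin_of_le
        intro y hy
        simp only [List.mem_map, List.mem_filter] at hy
        obtain ⟨p, ⟨hp, _⟩, rfl⟩ := hy
        have := pvEnumerate_fst_ge rest (s + 1) p hp
        omega
      rw [hmin]
      simp [List.takeWhile, hs]
    · have hfilter : (((s, t) :: PySem.List.enumerate rest (s + 1)).filter (fun p => pvStopB.contains p.2))
          = (PySem.List.enumerate rest (s + 1)).filter (fun p => pvStopB.contains p.2) := by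
        simp [hs]
      rw [hfilter]
      have h1 : s + ((t :: rest).length : Int) = (s + 1) + rest.length := by
        simp
        omega
      rw [h1, ih (s + 1)]
      simp [List.takeWhile, hs]; omega

-- B's cut point: min of stop indices (default length) is the takeWhile length
theorem pvCut_eq (ts : List String) :
    ((PySem.List.min?
        (((PySem.List.enumerate ts).filter (fun p => pvStopB.contains p.2)).map Prod.fst)
        (fun i => i)).getD (ts.length : Int))
      = ((ts.takeWhile (fun t => !pvStopB.contains t)).length : Int) := by
  have := pvCut_gen ts 0
  simpa using this

-- ===== VERDICT (by name: the statement is the Claim_ definition above) =====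
theorem normalise_tokens_py_spec : Claim_equal_normalise_tokens_py := by
  intro tokens _
  unfold Spec_normalise_tokens_py normalise_tokens_py normalise_tokens_py_alt
  rw [pvLoopA_eq]
  show _ = List.filter _ (PySem.List.slice tokens none (some _))
  rw [pvCut_eq, PySem.List.slice_to_natCast, List.nil_append]
  rw [← List.prefix_iff_eq_take.mp (List.takeWhile_prefix _)]
  rfl
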